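-- pv_equiv track=rewrite | github.com/macwiatrak/BacBench | bacbench/modeling/utils/utils_glm2.py | chunk_glm2_seqs
-- ===== SOURCE A (Python) =====
-- def get_last_strand_token(s: str) -> str | None:
--     """Return the last occurrence of '<+' or '<-' in s, or None if neither is present."""
--     i_plus = s.rfind("<+")
--     i_minus = s.rfind("<-")
--     if i_plus == -1 and i_minus == -1:
--         return None
--     if i_plus > i_minus:
--         return "<+>"
--     return "<->"
--
-- def chunk_glm2_seqs(
--     contig_texts: dict[int, str],
--     max_chars: int = 4096,
--     n_overlap: int = 64,
-- ) -> list[str]: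
--     """
--     Chunk gLM2 strings into fixed-size character windows *per contig*.
--
--     - Overlap: consecutive windows overlap by `n_overlap` characters (except
--       possibly the final window, which may overlap more due to end-alignment).
--     - No alignment to element boundaries (pure character slicing).
--     - Final window is end-aligned: if the last slice would be shorter than
--       `max_chars`, shift left so the window ends at the contig end for more context.
--
--     Notes
--     -----
--       * Requires a helper `get_last_strand_token(chunk: str) -> str | None`
--         that returns '<+' or '<-' (or None). If present, it's prepended to
--         the next window to carry strand context across cuts.
--     """
--     if max_chars <= 0:
--         raise ValueError("max_chars must be > 0")
--     if n_overlap < 0: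
--         raise ValueError("n_overlap must be >= 0")
--     if n_overlap >= max_chars:
--         raise ValueError("n_overlap must be < max_chars")
--
--     windows: list[str] = []
--
--     for _, text in sorted(contig_texts.items()):
--         if not text:
--             continue
--
--         last_strand_token = ""
--         step = max_chars - n_overlap
--         n = len(text)
--         start = 0
--
--         while start < n:
--             # Is this the final chunk for this contig?
--             is_last = (start + max_chars) >= n
--
--             # End-align the final window if it would be short.
--             if is_last and (n - start) < max_chars:
--                 start = max(0, n - max_chars)
--
--             chunk_raw = text[start : start + max_chars]
--             chunk = (last_strand_token or "") + chunk_raw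
--             if chunk:
--                 windows.append(chunk)
--
--             # Carry the last seen strand marker into the next chunk
--             tok = get_last_strand_token(chunk)
--             last_strand_token = tok if tok is not None else ""
--
--             if is_last:
--                 break  # emitted the final chunk for this contig
--
--             start += step
--
--     return windows
-- ===== SOURCE B (Python) =====
-- def get_last_strand_token(s: str) -> str | None:
--     """Return the last occurrence of '<+' or '<-' in s, or None if neither is present."""
--     i_plus = s.rfind("<+")
--     i_minus = s.rfind("<-")
--     if i_plus == -1 and i_minus == -1:
--         return None
--     if i_plus > i_minus:
--         return "<+>"
--     return "<->"
--
--
-- def chunk_glm2_seqs(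
--     contig_texts: dict[int, str],
--     max_chars: int = 4096,
--     n_overlap: int = 64,
-- ) -> list[str]:
--     """Same chunking, decomposed recursively: a pure structural recursion
--     consumes the contig string suffix by suffix (no start indices, no
--     in-loop end-alignment), and a second recursive pass prepends the
--     carried strand tokens."""
--     if max_chars <= 0:
--         raise ValueError("max_chars must be > 0")
--     if n_overlap < 0:
--         raise ValueError("n_overlap must be >= 0")
--     if n_overlap >= max_chars:
--         raise ValueError("n_overlap must be < max_chars")
--
--     step = max_chars - n_overlap
--
--     def split(t: str) -> list[str]:
--         # raw windows of t by consuming the string: emit the head window,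
--         # recurse on the suffix; the final window is the last max_chars chars.
--         if len(t) <= max_chars:
--             return [t]
--         if len(t) - step <= max_chars:
--             return [t[:max_chars], t[-max_chars:]]
--         return [t[:max_chars]] + split(t[step:])
--
--     def attach(raws: list[str], tok: str) -> list[str]:
--         # prepend the carried strand token to each raw window, recursively
--         if not raws:
--             return []
--         chunk = tok + raws[0]
--         t = get_last_strand_token(chunk)
--         return [chunk] + attach(raws[1:], t if t is not None else "")
--
--     return [
--         c
--         for _, text in sorted(contig_texts.items())
--         if text
--         for c in attach(split(text), "")
--     ]
-- ===== Notes on version B (the rewrite author's own statement) =====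
-- stated objective: alternative
-- what changed: A's imperative index-driven while-loop (start pointer, in-loop end-alignment, break, shared accumulator) is replaced by a pure structural recursion that consumes the contig string suffix by suffix to produce the raw windows, followed by a separate recursive pass that prepends the carried strand tokens, flattened over contigs by a comprehension.
import Mathlib
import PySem

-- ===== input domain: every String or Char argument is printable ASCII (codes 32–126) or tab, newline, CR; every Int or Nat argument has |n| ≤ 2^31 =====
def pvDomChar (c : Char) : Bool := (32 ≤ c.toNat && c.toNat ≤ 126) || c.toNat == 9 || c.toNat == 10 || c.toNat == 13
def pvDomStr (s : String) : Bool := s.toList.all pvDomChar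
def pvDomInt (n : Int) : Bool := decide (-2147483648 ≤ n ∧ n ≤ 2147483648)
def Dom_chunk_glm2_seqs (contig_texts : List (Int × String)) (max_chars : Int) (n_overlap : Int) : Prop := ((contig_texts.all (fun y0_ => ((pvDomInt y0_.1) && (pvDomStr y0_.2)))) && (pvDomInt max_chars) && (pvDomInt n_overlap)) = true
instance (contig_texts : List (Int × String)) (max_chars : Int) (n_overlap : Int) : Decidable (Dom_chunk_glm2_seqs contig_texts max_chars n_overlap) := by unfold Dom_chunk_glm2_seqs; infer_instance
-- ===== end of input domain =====

-- B replaces A's index-driven while-loop (start pointer, in-loop end-alignment, break) by a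
-- pure structural recursion consuming the contig string suffix by suffix, plus a separate
-- recursive token-prefixing pass (objective: alternative decomposition, same results).

-- ===== PORT A =====
-- helper shared by the two Pythons verbatim
def get_last_strand_token (s : String) : Option String :=
  let i_plus := PySem.Str.rfind s "<+"
  let i_minus := PySem.Str.rfind s "<-"
  if i_plus = -1 ∧ i_minus = -1 then none
  else if i_plus > i_minus then some "<+>"
  else some "<->"

-- A's inner `while start < n` loop; fuel bounds the iteration count (the loop
-- advances by step ≥ 1 under Pre_, so fuel = len(text)+1 always suffices there).
def aChunkLoop (text : List Char) (max_chars step n : Int) :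
    Nat → Int → List Char → List String → List String
  | 0, _, _, windows => windows
  | fuel + 1, start, last_strand_token, windows =>
    if start < n then
      let is_last := n ≤ start + max_chars
      let start := if is_last ∧ n - start < max_chars then max 0 (n - max_chars) else start
      let chunk_raw := PySem.List.slice text (some start) (some (start + max_chars))
      let chunk := last_strand_token ++ chunk_raw
      let windows := if chunk ≠ [] then windows ++ [String.ofList chunk] else windows
      let tok' := match get_last_strand_token (String.ofList chunk) with
        | some t => t.toList
        | none => []
      if is_last then windows
      else aChunkLoop text max_chars step n fuel (start + step) tok' windows
    else windows

def chunk_glm2_seqs (contig_texts : List (Int × String)) (max_chars : Int) (n_overlap : Int) : List String :=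
  -- the three Python `raise ValueError` guards: excluded by Pre_chunk_glm2_seqs
  if max_chars ≤ 0 then []
  else if n_overlap < 0 then []
  else if max_chars ≤ n_overlap then []
  else
    (PySem.List.sorted (PySem.Dict.ofList contig_texts).items (fun p => p.1) false).foldl
      (fun windows kv =>
        let text := kv.2.toList
        if text = [] then windows
        else
          aChunkLoop text max_chars (max_chars - n_overlap) (text.length : Int)
            (text.length + 1) 0 [] windows)
      []

-- ===== PORT B =====
-- B's `split`: structural recursion consuming the string; fuel = len(t)+1 suffices
-- since each recursive call drops step ≥ 1 characters.
def bSplit (max_chars step : Int) : Nat → List Char → List (List Char)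
  | 0, _ => []
  | fuel + 1, t =>
    if (t.length : Int) ≤ max_chars then [t]
    else if (t.length : Int) - step ≤ max_chars then
      [PySem.List.slice t none (some max_chars), PySem.List.slice t (some (-max_chars)) none]
    else PySem.List.slice t none (some max_chars)
         :: bSplit max_chars step fuel (PySem.List.slice t (some step) none)

-- B's `attach`: recursive pass prepending the carried strand token
def bAttach : List (List Char) → List Char → List String
  | [], _ => []
  | r :: rest, tok =>
    let chunk := tok ++ r
    let tok' := match get_last_strand_token (String.ofList chunk) with
      | some t => t.toList
      | none => []
    String.ofList chunk :: bAttach rest tok'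

def chunk_glm2_seqs_alt (contig_texts : List (Int × String)) (max_chars : Int) (n_overlap : Int) : List String :=
  if max_chars ≤ 0 then []
  else if n_overlap < 0 then []
  else if max_chars ≤ n_overlap then []
  else
    (PySem.List.sorted (PySem.Dict.ofList contig_texts).items (fun p => p.1) false).flatMap
      (fun kv =>
        if kv.2.toList = [] then []
        else bAttach
          (bSplit max_chars (max_chars - n_overlap) (kv.2.toList.length + 1) kv.2.toList) [])

-- ===== PRECONDITION & SPEC =====
-- exactly the inputs on which the Python A returns (otherwise it raises ValueError)
def Pre_chunk_glm2_seqs (contig_texts : List (Int × String)) (max_chars : Int) (n_overlap : Int) : Prop :=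
  0 < max_chars ∧ 0 ≤ n_overlap ∧ n_overlap < max_chars

instance (contig_texts : List (Int × String)) (max_chars : Int) (n_overlap : Int) : Decidable (Pre_chunk_glm2_seqs contig_texts max_chars n_overlap) := by unfold Pre_chunk_glm2_seqs; infer_instance

def pvWitness_chunk_glm2_seqs : (List (Int × String)) × Int × Int := ([(1, "a<+b"), (0, "cd")], 3, 1)

def Spec_chunk_glm2_seqs (contig_texts : List (Int × String)) (max_chars : Int) (n_overlap : Int) (out : List String) : Prop := out = chunk_glm2_seqs_alt contig_texts max_chars n_overlap
instance (contig_texts : List (Int × String)) (max_chars : Int) (n_overlap : Int) (out : List String) : Decidable (Spec_chunk_glm2_seqs contig_texts max_chars n_overlap out) := by unfold Spec_chunk_glm2_seqs; infer_instance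

-- ===== CLAIM (what is proved, stated in full; the proofs are below) =====
def Claim_equal_chunk_glm2_seqs : Prop := ∀ (contig_texts : List (Int × String)) (max_chars : Int) (n_overlap : Int), Dom_chunk_glm2_seqs contig_texts max_chars n_overlap → Pre_chunk_glm2_seqs contig_texts max_chars n_overlap → Spec_chunk_glm2_seqs contig_texts max_chars n_overlap (chunk_glm2_seqs contig_texts max_chars n_overlap)

-- ===== LEMMAS AND PROOFS =====

-- a window slice is never empty when its start is a valid index
lemma slice_ne_nil (text : List Char) (s mc : Int) (h0 : 0 ≤ s)
    (hs : s < (text.length : Int)) (hmc : 0 < mc) :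
    PySem.List.slice text (some s) (some (s + mc)) ≠ [] := by
  rw [PySem.List.slice_toNat text h0 (by omega)]
  intro h
  have := congrArg List.length h
  simp [List.length_take, List.length_drop] at this
  omega

-- the heart: A's fueled while-loop on absolute indices equals B's recursive
-- split-then-attach on the corresponding suffix, per contig
lemma loop_eq (text : List Char) (mc ov : Int) (hmc : 0 < mc) (hov : 0 ≤ ov)
    (hlt : ov < mc) :
    ∀ (fa : Nat) (s : Int) (tok : List Char) (acc : List String) (fb : Nat),
      0 ≤ s → s < (text.length : Int) → ((text.length : Int) - s).toNat < fa →
      ((text.length : Int) - s).toNat < fb →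
      (s = 0 ∨ mc < (text.length : Int) - s) →
      aChunkLoop text mc (mc - ov) (text.length : Int) fa s tok acc
        = acc ++ bAttach (bSplit mc (mc - ov) fb (text.drop s.toNat)) tok := by
  intro fa
  induction fa with
  | zero => intro s tok acc fb _ _ hf _ _; omega
  | succ fa ih =>
    intro s tok acc fb h0 hsn hfa hfb hinv
    set n : Int := (text.length : Int) with hn
    obtain ⟨fb, rfl⟩ : ∃ m, fb = m + 1 := ⟨fb - 1, by omega⟩
    have hstep : 0 < mc - ov := by omega
    have hlen : ((text.drop s.toNat).length : Int) = n - s := by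
      simp [List.length_drop]; omega
    have hslice1 : PySem.List.slice text (some s) (some (s + mc))
        = PySem.List.slice (text.drop s.toNat) none (some mc) := by
      rw [PySem.List.slice_toNat text h0 (by omega), PySem.List.slice_to _ (by omega)]
      congr 1
      omega
    by_cases hcase1 : n - s ≤ mc
    · -- final, end-aligned-at-0 window: s = 0 and the whole text fits
      have hs0 : s = 0 := by rcases hinv with h | h; exacts [h, by omega]
      subst hs0
      have hstart : (if n ≤ 0 + mc ∧ n - 0 < mc then max 0 (n - mc) else 0) = 0 := by
        by_cases h : n - 0 < mc
        · rw [if_pos ⟨by omega, h⟩]; omega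
        · rw [if_neg (by tauto)]
      have hne : tok ++ PySem.List.slice text (some 0) (some (0 + mc)) ≠ [] := by
        have := slice_ne_nil text 0 mc le_rfl (by omega) hmc
        intro h
        rcases List.append_eq_nil_iff.mp h with ⟨_, h2⟩
        exact this (by simpa using h2)
      simp only [aChunkLoop, if_pos hsn, hstart]
      rw [if_pos (by omega : n ≤ 0 + mc), if_pos hne]
      simp only [Int.toNat_zero, List.drop_zero, bSplit]
      rw [if_pos (by omega : ((text.length : Int)) ≤ mc)]
      simp only [bAttach]
      have hsl : PySem.List.slice text (some 0) (some (0 + mc)) = text := by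
        rw [PySem.List.slice_toNat text le_rfl (by omega)]
        have h00 : (0:Int).toNat = 0 := rfl
        rw [h00, List.drop_zero]
        apply List.take_of_length_le
        omega
      rw [hsl]
    · have hraw : tok ++ PySem.List.slice text (some s) (some (s + mc)) ≠ [] := by
        have := slice_ne_nil text s mc h0 hsn hmc
        intro h
        rcases List.append_eq_nil_iff.mp h with ⟨_, h2⟩
        exact this h2
      have hnotlast : ¬ n ≤ s + mc := by omega
      by_cases hcase2 : n - s - (mc - ov) ≤ mc
      · -- penultimate window here, then the end-aligned final one
        obtain ⟨fa, rfl⟩ : ∃ m, fa = m + 1 := ⟨fa - 1, by omega⟩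
        have hs2 : s + (mc - ov) < n := by omega
        have hstart2 : (if n ≤ s + (mc - ov) + mc ∧ n - (s + (mc - ov)) < mc
            then max 0 (n - mc) else s + (mc - ov)) = n - mc := by
          by_cases h : n - (s + (mc - ov)) < mc
          · rw [if_pos ⟨by omega, h⟩]; omega
          · rw [if_neg (by tauto)]; omega
        have hne2 : ∀ tk : List Char,
            tk ++ PySem.List.slice text (some (n - mc)) (some (n - mc + mc)) ≠ [] := by
          intro tk h
          rcases List.append_eq_nil_iff.mp h with ⟨_, h2⟩
          exact slice_ne_nil text (n - mc) mc (by omega) (by omega) hmc h2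
        simp only [aChunkLoop, if_pos hsn, if_neg (by tauto :
          ¬ (n ≤ s + mc ∧ n - s < mc)), if_pos hraw, if_neg hnotlast,
          if_pos hs2, hstart2, if_pos (by omega : n ≤ s + (mc - ov) + mc),
          if_pos (hne2 _)]
        -- B side: the two-window branch of bSplit
        simp only [bSplit]
        rw [if_neg (by omega : ¬ ((text.drop s.toNat).length : Int) ≤ mc),
            if_pos (by omega : ((text.drop s.toNat).length : Int) - (mc - ov) ≤ mc)]
        simp only [bAttach]
        have hsliceLast : PySem.List.slice text (some (n - mc)) (some (n - mc + mc))
            = PySem.List.slice (text.drop s.toNat) (some (-mc)) none := by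
          have hmcn : mc = ((mc.toNat : Nat) : Int) := by omega
          rw [hmcn, PySem.List.slice_from_neg_natCast _ _ (by omega)]
          rw [PySem.List.slice_toNat text (by omega) (by omega)]
          rw [List.drop_drop, List.take_of_length_le (by simp; omega)]
          congr 1
          simp
          omega
        rw [hslice1, hsliceLast]
        simp
      · -- interior window: peel it and recurse on the suffix
        have hs2 : s + (mc - ov) < n := by omega
        simp only [aChunkLoop, if_pos hsn, if_neg (by tauto :
          ¬ (n ≤ s + mc ∧ n - s < mc)), if_pos hraw, if_neg hnotlast]
        rw [ih (s + (mc - ov)) _ _ (fb) (by omega) hs2 (by omega) (by omega)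
            (Or.inr (by omega))]
        -- B side: the recursive branch of bSplit
        conv_rhs => rw [bSplit]
        rw [if_neg (by omega : ¬ ((text.drop s.toNat).length : Int) ≤ mc),
            if_neg (by omega : ¬ ((text.drop s.toNat).length : Int) - (mc - ov) ≤ mc)]
        simp only [bAttach]
        have hdrop : text.drop (s + (mc - ov)).toNat
            = PySem.List.slice (text.drop s.toNat) (some (mc - ov)) none := by
          rw [PySem.List.slice_from _ (by omega), List.drop_drop]
          congr 1
          omega
        rw [hslice1, hdrop]
        simp

-- ===== VERDICT (by name: the statement is the Claim_ definition above) =====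
theorem chunk_glm2_seqs_spec : Claim_equal_chunk_glm2_seqs := by
  intro contig_texts max_chars n_overlap _ hpre
  obtain ⟨hmc, hov, hlt⟩ := hpre
  unfold Spec_chunk_glm2_seqs chunk_glm2_seqs chunk_glm2_seqs_alt
  rw [if_neg (by omega), if_neg (by omega), if_neg (by omega),
      if_neg (by omega), if_neg (by omega), if_neg (by omega)]
  rw [PySem.List.foldl_congr_mem (g := fun windows kv =>
        windows ++ (if kv.2.toList = [] then []
          else bAttach (bSplit max_chars (max_chars - n_overlap)
            (kv.2.toList.length + 1) kv.2.toList) []))]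
  · rw [PySem.List.foldl_append_eq_flatMap]
    simp
  · intro acc kv _
    simp only
    by_cases hnil : kv.2.toList = []
    · rw [if_pos hnil, if_pos hnil]
      simp
    · rw [if_neg hnil, if_neg hnil]
      have hlen : 0 < kv.2.toList.length := List.length_pos_iff.mpr hnil
      have := loop_eq kv.2.toList max_chars n_overlap hmc hov hlt
        (kv.2.toList.length + 1) 0 [] acc (kv.2.toList.length + 1)
        le_rfl (by exact_mod_cast hlen) (by omega) (by omega) (Or.inl rfl)
      simpa using this
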